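-- pv_equiv track=rewrite | github.com/SONARAFUDIA/STKIProject | src/entity_extraction/method3_embeddings.py | _analyze_method_contributions
-- ===== SOURCE A (Python) =====
-- from typing import Dict, List, Any, Tuple, Optional
-- from collections import defaultdict, Counter
--
-- def _analyze_method_contributions(final_entities: List[Dict]) -> Dict[str, Dict]:
--     """Analyze how much each method contributed"""
--     contributions = defaultdict(lambda: {'total': 0, 'unique': 0, 'shared': 0})
--
--     for entity in final_entities:
--         detected_by = entity['detected_by']
--
--         for method in detected_by:
--             contributions[method]['total'] += 1
--
--             if len(detected_by) == 1:
--                 contributions[method]['unique'] += 1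
--             else:
--                 contributions[method]['shared'] += 1
--
--     return dict(contributions)
-- ===== SOURCE B (Python) =====
-- from collections import Counter
--
-- def _analyze_method_contributions(final_entities):
--     total = Counter(m for e in final_entities for m in e['detected_by'])
--     unique = Counter(m for e in final_entities if len(e['detected_by']) == 1
--                      for m in e['detected_by'])
--     return {m: {'total': t, 'unique': unique[m], 'shared': t - unique[m]}
--             for m, t in total.items()}
-- ===== Notes on version B (the rewrite author's own statement) =====
-- stated objective: alternative
-- what changed: Replaces A's single interleaved pass that mutates a nested defaultdict with branching per occurrence by two Counter aggregation passes (all occurrences; occurrences from singleton detected_by lists) combined in a final dict comprehension via shared = total - unique.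
import Mathlib
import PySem

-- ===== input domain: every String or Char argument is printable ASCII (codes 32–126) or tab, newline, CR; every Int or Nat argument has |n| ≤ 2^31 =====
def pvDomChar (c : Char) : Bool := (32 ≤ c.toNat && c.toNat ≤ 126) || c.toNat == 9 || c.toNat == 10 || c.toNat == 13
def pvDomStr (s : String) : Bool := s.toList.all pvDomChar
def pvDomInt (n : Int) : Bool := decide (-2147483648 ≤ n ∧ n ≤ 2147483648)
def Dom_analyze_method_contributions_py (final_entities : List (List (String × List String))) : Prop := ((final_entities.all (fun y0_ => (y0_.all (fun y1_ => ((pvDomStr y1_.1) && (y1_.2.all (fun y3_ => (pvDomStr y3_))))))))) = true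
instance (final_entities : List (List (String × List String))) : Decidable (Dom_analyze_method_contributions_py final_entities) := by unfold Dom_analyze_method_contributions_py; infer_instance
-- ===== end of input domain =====

-- B builds two Counters (all method occurrences; occurrences from singleton detected_by lists) and derives
-- shared = total - unique, instead of A's single pass mutating a nested defaultdict with a branch per occurrence.

-- ===== PORT A =====
-- the defaultdict's default value {'total': 0, 'unique': 0, 'shared': 0}
def pvDefault : PySem.Dict String Int :=
  PySem.Dict.mk [("total", 0), ("unique", 0), ("shared", 0)]

-- body of A's inner loop on one method occurrence: total += 1, then unique/shared += 1 by the branch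
def pvUpd (flag : Bool) (c : PySem.Dict String Int) : PySem.Dict String Int :=
  let c := c.modify "total" 0 (· + 1)
  if flag then c.modify "unique" 0 (· + 1) else c.modify "shared" 0 (· + 1)

def analyze_method_contributions_py (final_entities : List (List (String × List String))) : List (String × List (String × Int)) :=
  ((final_entities.foldl (fun contributions entity =>
      let detected_by := (List.lookup "detected_by" entity).getD []   -- none = KeyError, excluded by Pre_
      detected_by.foldl (fun contributions method =>
        contributions.modify method pvDefault (pvUpd (detected_by.length == 1))) contributions)
    PySem.Dict.empty).items).map (fun p => (p.1, p.2.items))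

-- ===== PORT B =====
def analyze_method_contributions_py_alt (final_entities : List (List (String × List String))) : List (String × List (String × Int)) :=
  let total := PySem.Dict.counter
    (final_entities.flatMap (fun e => (List.lookup "detected_by" e).getD []))
  let unique := PySem.Dict.counter
    ((final_entities.filter (fun e => ((List.lookup "detected_by" e).getD []).length == 1)).flatMap
      (fun e => (List.lookup "detected_by" e).getD []))
  total.items.map (fun p =>
    (p.1, [("total", p.2), ("unique", unique.getD p.1 0), ("shared", p.2 - unique.getD p.1 0)]))

-- ===== PRECONDITION & SPEC =====
-- Pre_ excludes exactly the inputs containing an entity without the key 'detected_by', on which A raises KeyError.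
def Pre_analyze_method_contributions_py (final_entities : List (List (String × List String))) : Prop :=
  (final_entities.all (fun e => (List.lookup "detected_by" e).isSome)) = true
instance (final_entities : List (List (String × List String))) : Decidable (Pre_analyze_method_contributions_py final_entities) := by unfold Pre_analyze_method_contributions_py; infer_instance
def pvWitness_analyze_method_contributions_py : (List (List (String × List String))) :=
  [[("detected_by", ["a", "b"])], [("detected_by", ["a"])]]
def Spec_analyze_method_contributions_py (final_entities : List (List (String × List String))) (out : List (String × List (String × Int))) : Prop := out = analyze_method_contributions_py_alt final_entities
instance (final_entities : List (List (String × List String))) (out : List (String × List (String × Int))) : Decidable (Spec_analyze_method_contributions_py final_entities out) := by unfold Spec_analyze_method_contributions_py; infer_instance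

-- ===== CLAIM (what is proved, stated in full; the proofs are below) =====
def Claim_equal_analyze_method_contributions_py : Prop := ∀ (final_entities : List (List (String × List String))), Dom_analyze_method_contributions_py final_entities → Pre_analyze_method_contributions_py final_entities → Spec_analyze_method_contributions_py final_entities (analyze_method_contributions_py final_entities)

-- ===== LEMMAS AND PROOFS =====

-- folding over a flattened list is the nested fold
theorem pv_foldl_flatMap {α β σ : Type} (l : List α) (f : α → List β) (g : σ → β → σ) (init : σ) :
    ((l.flatMap f).foldl g init) = l.foldl (fun s a => (f a).foldl g s) init := by
  induction l generalizing init with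
  | nil => rfl
  | cons h t ih => simp [List.flatMap_cons, List.foldl_append, ih]

-- the per-occurrence step of A's loops, on (method, detected_by-has-length-1) pairs
def pvStep (d : PySem.Dict String (PySem.Dict String Int)) (q : String × Bool) : PySem.Dict String (PySem.Dict String Int) :=
  d.modify q.1 pvDefault (pvUpd q.2)

-- the flattened occurrence list
def pvPairs (final_entities : List (List (String × List String))) : List (String × Bool) :=
  final_entities.flatMap (fun e =>
    ((List.lookup "detected_by" e).getD []).map
      (fun m => (m, ((List.lookup "detected_by" e).getD []).length == 1)))

-- the inner dict A holds for method m after processing the occurrence pairs ps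
def pvInner (ps : List (String × Bool)) (m : String) : PySem.Dict String Int :=
  PySem.Dict.mk [("total", (ps.countP (fun q => q.1 == m) : Int)),
                 ("unique", (ps.countP (fun q => q.1 == m && q.2) : Int)),
                 ("shared", (ps.countP (fun q => q.1 == m && !q.2) : Int))]

theorem pvUpd_inner (u : Bool) (a b c : Int) :
    pvUpd u (PySem.Dict.mk [("total", a), ("unique", b), ("shared", c)])
      = PySem.Dict.mk [("total", a + 1), ("unique", if u then b + 1 else b),
                       ("shared", if u then c else c + 1)] := by
  cases u <;> rfl

theorem pvInner_append_self (ps : List (String × Bool)) (m : String) (u : Bool) :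
    pvInner (ps ++ [(m, u)]) m = pvUpd u (pvInner ps m) := by
  simp only [pvInner]
  rw [pvUpd_inner]
  cases u <;> simp [List.countP_append]

theorem pvInner_append_ne (ps : List (String × Bool)) (m k : String) (u : Bool) (h : k ≠ m) :
    pvInner (ps ++ [(m, u)]) k = pvInner ps k := by
  simp [pvInner, List.countP_append, Ne.symm h]

theorem pvFold_items (ps : List (String × Bool)) :
    (ps.foldl pvStep PySem.Dict.empty).items
      = (PySem.Set.ofList (ps.map (·.1))).map (fun m => (m, pvInner ps m)) := by
  induction ps using List.reverseRecOn with
  | nil => rfl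
  | append_singleton ps q ih =>
    obtain ⟨m, u⟩ := q
    rw [List.foldl_append]
    set D := ps.foldl pvStep PySem.Dict.empty with hD
    have hkeys : D.keys = PySem.Set.ofList (ps.map (·.1)) := by
      simp only [PySem.Dict.keys, ih, List.map_map]
      simp [Function.comp_def]
    have hnd : D.keys.Nodup := by rw [hkeys]; exact PySem.Set.nodup_ofList _
    have hset : PySem.Set.ofList ((ps ++ [(m, u)]).map (·.1))
        = PySem.Set.add (PySem.Set.ofList (ps.map (·.1))) m := by
      rw [List.map_append]
      simp only [List.map_cons, List.map_nil]
      rw [PySem.Set.ofList_append_singleton]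
    show (D.insert m (pvUpd u (D.getD m pvDefault))).items = _
    by_cases hm : m ∈ ps.map (·.1)
    · have hmemS : m ∈ PySem.Set.ofList (ps.map (·.1)) := (PySem.Set.mem_ofList _ _).mpr hm
      have hmem : (m, pvInner ps m) ∈ D.items := by
        rw [ih]; exact List.mem_map.mpr ⟨m, hmemS, rfl⟩
      have hget : D.getD m pvDefault = pvInner ps m :=
        PySem.Dict.getD_of_mem_items D hmem hnd _
      have hcont : D.contains m = true := by
        rw [PySem.Dict.contains_iff_mem_keys, hkeys]; exact hmemS
      rw [PySem.Dict.items_insert_of_contains D _ hcont, ih, hget, hset,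
        PySem.Set.add_of_mem hmemS, List.map_map]
      refine List.map_congr_left (fun k hk => ?_)
      by_cases hkm : k = m
      · subst hkm; simp [pvInner_append_self]
      · simp [hkm, pvInner_append_ne ps m k u hkm]
    · have hmemS : m ∉ PySem.Set.ofList (ps.map (·.1)) := fun h => hm ((PySem.Set.mem_ofList _ _).mp h)
      have hcont : D.contains m = false := by
        rw [← Bool.not_eq_true, PySem.Dict.contains_iff_mem_keys, hkeys]; exact hmemS
      have hget : D.getD m pvDefault = pvDefault :=
        PySem.Dict.getD_of_not_contains D _ hcont
      rw [PySem.Dict.items_insert_of_not_contains D _ hcont, ih, hget, hset,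
        PySem.Set.add_of_not_mem hmemS, List.map_append]
      congr 1
      · refine List.map_congr_left (fun k hk => ?_)
        have hkm : k ≠ m := fun h => hmemS (h ▸ hk)
        rw [pvInner_append_ne ps m k u hkm]
      · have hne : ∀ (f : String × Bool → Bool), (∀ q, f q = true → q.1 = m) →
            ps.countP f = 0 := fun f hf => List.countP_eq_zero.mpr (fun q hq hfq =>
              hm (List.mem_map.mpr ⟨q, hq, hf q hfq⟩))
        have hz1 : ps.countP (fun q => q.1 == m) = 0 :=
          hne _ (fun q h => by simpa using h)
        have hz2 : ps.countP (fun q => q.1 == m && q.2) = 0 :=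
          hne _ (fun q h => by simp at h; exact h.1)
        have hz3 : ps.countP (fun q => q.1 == m && !q.2) = 0 :=
          hne _ (fun q h => by simp at h; exact h.1)
        have hdef : pvInner ps m = pvDefault := by
          simp [pvInner, pvDefault, hz1, hz2, hz3]
        simp only [List.map_cons, List.map_nil, pvInner_append_self, hdef]

theorem pvA_eq_fold (fe : List (List (String × List String))) :
    analyze_method_contributions_py fe
      = (((pvPairs fe).foldl pvStep PySem.Dict.empty).items).map (fun p => (p.1, p.2.items)) := by
  unfold analyze_method_contributions_py pvPairs
  rw [pv_foldl_flatMap]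
  have hstep : (fun (contributions : PySem.Dict String (PySem.Dict String Int)) entity =>
      let detected_by := (List.lookup "detected_by" entity).getD []
      detected_by.foldl (fun contributions method =>
        contributions.modify method pvDefault (pvUpd (detected_by.length == 1))) contributions)
    = (fun (s : PySem.Dict String (PySem.Dict String Int)) (e : List (String × List String)) =>
        (((List.lookup "detected_by" e).getD []).map
          (fun m => (m, ((List.lookup "detected_by" e).getD []).length == 1))).foldl pvStep s) := by
    funext d e
    rw [List.foldl_map]
    rfl
  rw [hstep]

theorem pvCountP_split (ps : List (String × Bool)) (m : String) :
    ps.countP (fun q => q.1 == m)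
      = ps.countP (fun q => q.1 == m && q.2) + ps.countP (fun q => q.1 == m && !q.2) := by
  induction ps with
  | nil => rfl
  | cons h t ih => by_cases hq : (h.1 == m) <;> cases hh : h.2 <;>
      simp [hq, hh, ih] <;> omega

theorem pvTotal_map (fe : List (List (String × List String))) :
    (pvPairs fe).map (·.1) = fe.flatMap (fun e => (List.lookup "detected_by" e).getD []) := by
  simp [pvPairs, List.map_flatMap, Function.comp_def]

theorem pvTotal_count (fe : List (List (String × List String))) (m : String) :
    (fe.flatMap (fun e => (List.lookup "detected_by" e).getD [])).count m
      = (pvPairs fe).countP (fun q => q.1 == m) := by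
  rw [← pvTotal_map, List.count_eq_countP, List.countP_map]
  rfl

theorem pvUnique_count (fe : List (List (String × List String))) (m : String) :
    ((fe.filter (fun e => ((List.lookup "detected_by" e).getD []).length == 1)).flatMap
      (fun e => (List.lookup "detected_by" e).getD [])).count m
      = (pvPairs fe).countP (fun q => q.1 == m && q.2) := by
  induction fe with
  | nil => rfl
  | cons e t ih =>
    by_cases h : ((List.lookup "detected_by" e).getD []).length = 1
    · simp [pvPairs, List.flatMap_cons, h, List.countP_append,
        List.countP_map, List.count_eq_countP, Function.comp_def]
      simpa [pvPairs, List.count_eq_countP] using ih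
    · simp [pvPairs, List.flatMap_cons, h, List.countP_append,
        List.countP_map, ih, Function.comp_def]

-- ===== VERDICT (by name: the statement is the Claim_ definition above) =====
theorem analyze_method_contributions_py_spec : Claim_equal_analyze_method_contributions_py := by
  intro fe _hdom _hpre
  unfold Spec_analyze_method_contributions_py analyze_method_contributions_py_alt
  show _ = ((PySem.Dict.counter (fe.flatMap (fun e => (List.lookup "detected_by" e).getD []))).items).map
    (fun p => (p.1, [("total", p.2),
      ("unique", (PySem.Dict.counter ((fe.filter (fun e => ((List.lookup "detected_by" e).getD []).length == 1)).flatMap (fun e => (List.lookup "detected_by" e).getD []))).getD p.1 0),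
      ("shared", p.2 - (PySem.Dict.counter ((fe.filter (fun e => ((List.lookup "detected_by" e).getD []).length == 1)).flatMap (fun e => (List.lookup "detected_by" e).getD []))).getD p.1 0)]))
  rw [pvA_eq_fold, pvFold_items, pvTotal_map, PySem.Dict.items_counter,
    List.map_map, List.map_map]
  refine List.map_congr_left (fun m _hm => ?_)
  simp only [Function.comp_def]
  rw [pvTotal_count, PySem.Dict.getD_counter, pvUnique_count]
  show (m, (pvInner (pvPairs fe) m).items) = _
  simp only [pvInner, Prod.mk.injEq, true_and]
  have := pvCountP_split (pvPairs fe) m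
  simp
  omega
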